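-- pv_equiv track=rewrite | github.com/FMF-projects/PSA1 | podkupnine.py | vsota_vrste
-- ===== SOURCE A (Python) =====
-- def vsota_vrste(q, n, t):
-- 	"""Vrne vsoto geometrijske vrste do vključno n-tega člena po modulu t."""
--
-- 	a = 1
-- 	q = q % t
-- 	vsota = 0
-- 	while n > 0:
-- 		if n % 2 == 1:
-- 			vsota = (q * vsota + a) % t
-- 		a = ((q + 1) * a) % t
-- 		q = (q * q) % t
-- 		n = n // 2
-- 	return vsota
-- ===== SOURCE B (Python) =====
-- def vsota_vrste(q, n, t):
--     """Vrne vsoto geometrijske vrste do vključno n-tega člena po modulu t."""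
--     q = q % t
--
--     def vsota(n):
--         if n <= 0:
--             return 0
--         if n % 2 == 1:
--             return (1 + q * vsota(n - 1)) % t
--         h = vsota(n // 2)
--         return (h + pow(q, n // 2, t) * h) % t
--
--     return vsota(n)
-- ===== Notes on version B (the rewrite author's own statement) =====
-- stated objective: alternative
-- what changed: Replaced A's bottom-up binary-doubling state machine (maintaining a, q, vsota across bits of n) with a top-down halving recursion S(2k)=(1+q^k)S(k), S(odd)=1+q*S(n-1) that uses Python's built-in three-argument pow; same O(log n) cost.
import Mathlib
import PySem

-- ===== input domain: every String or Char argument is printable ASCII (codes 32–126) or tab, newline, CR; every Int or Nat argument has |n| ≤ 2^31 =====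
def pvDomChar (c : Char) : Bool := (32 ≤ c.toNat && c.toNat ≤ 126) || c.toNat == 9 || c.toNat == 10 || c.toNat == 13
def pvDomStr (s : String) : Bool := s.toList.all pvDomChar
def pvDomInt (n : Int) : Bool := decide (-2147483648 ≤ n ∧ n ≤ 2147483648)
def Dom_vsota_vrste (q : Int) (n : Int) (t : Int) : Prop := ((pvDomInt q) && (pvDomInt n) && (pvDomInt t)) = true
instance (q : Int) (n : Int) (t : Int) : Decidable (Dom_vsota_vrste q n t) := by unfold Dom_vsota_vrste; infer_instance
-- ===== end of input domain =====

-- B replaces A's bottom-up binary-doubling state machine with a top-down halving recursion on n that uses Python's built-in three-argument pow (alternative formulation, same O(log n) cost).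

-- ===== PORT A =====
-- while n > 0: (if n % 2 == 1: vsota = (q*vsota+a)%t); a = ((q+1)*a)%t; q = (q*q)%t; n = n//2
def vsotaLoopA (t q a vsota n : Int) : Int :=
  if h : 0 < n then
    let vsota' := if PySem.Int.mod n 2 = 1 then PySem.Int.mod (q * vsota + a) t else vsota
    vsotaLoopA t (PySem.Int.mod (q * q) t) (PySem.Int.mod ((q + 1) * a) t) vsota'
      (PySem.Int.floordiv n 2)
  else vsota
termination_by n.toNat
decreasing_by
  simp only [PySem.Int.floordiv, Int.fdiv_eq_ediv_of_nonneg _ (by norm_num : (0:Int) ≤ 2)]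
  omega

def vsota_vrste (q : Int) (n : Int) (t : Int) : Int :=
  vsotaLoopA t (PySem.Int.mod q t) 1 0 n

-- ===== PORT B =====
-- def vsota(n): if n <= 0: 0; if n % 2 == 1: (1 + q*vsota(n-1)) % t; else h = vsota(n//2); (h + pow(q, n//2, t)*h) % t
def vsotaRec (t q n : Int) : Int :=
  if _h0 : n ≤ 0 then 0
  else if PySem.Int.mod n 2 = 1 then
    PySem.Int.mod (1 + q * vsotaRec t q (n - 1)) t
  else
    let h := vsotaRec t q (PySem.Int.floordiv n 2)
    PySem.Int.mod (h + PySem.Int.powMod q (PySem.Int.floordiv n 2).toNat t * h) t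
termination_by n.toNat
decreasing_by
  · omega
  · simp only [PySem.Int.floordiv, Int.fdiv_eq_ediv_of_nonneg _ (by norm_num : (0:Int) ≤ 2)]
    omega

def vsota_vrste_alt (q : Int) (n : Int) (t : Int) : Int :=
  vsotaRec t (PySem.Int.mod q t) n

-- ===== PRECONDITION & SPEC =====
-- Pre_ excludes exactly t = 0, where Python's `q % t` raises ZeroDivisionError in both programs.
def Pre_vsota_vrste (q : Int) (n : Int) (t : Int) : Prop := t ≠ 0
instance (q : Int) (n : Int) (t : Int) : Decidable (Pre_vsota_vrste q n t) := by
  unfold Pre_vsota_vrste; infer_instance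

def pvWitness_vsota_vrste : Int × Int × Int := (2, 5, 7)

def Spec_vsota_vrste (q : Int) (n : Int) (t : Int) (out : Int) : Prop := out = vsota_vrste_alt q n t
instance (q : Int) (n : Int) (t : Int) (out : Int) : Decidable (Spec_vsota_vrste q n t out) := by
  unfold Spec_vsota_vrste; infer_instance

-- ===== CLAIM (what is proved, stated in full; the proofs are below) =====
def Claim_equal_vsota_vrste : Prop := ∀ (q : Int) (n : Int) (t : Int), Dom_vsota_vrste q n t → Pre_vsota_vrste q n t → Spec_vsota_vrste q n t (vsota_vrste q n t)

-- ===== LEMMAS AND PROOFS =====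

/-- Partial sums of the geometric series: `geomS q k = 1 + q + … + q^(k-1)`. -/
def geomS (q : Int) : Nat → Int
  | 0 => 0
  | k + 1 => geomS q k + q ^ k

theorem emod_fmod (a t : Int) : (Int.fmod a t) % t = a % t := by
  rw [Int.fmod_eq_emod]
  split <;> simp

theorem fmod_modeq (a t : Int) : Int.ModEq t (Int.fmod a t) a := emod_fmod a t

theorem fmod_congr {a b : Int} (t : Int) (h : Int.ModEq t a b) : Int.fmod a t = Int.fmod b t := by
  have hd : (t ∣ a) ↔ (t ∣ b) := by
    simp only [Int.dvd_iff_emod_eq_zero]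
    unfold Int.ModEq at h
    omega
  rw [Int.fmod_eq_emod, Int.fmod_eq_emod, h]
  simp only [hd]

theorem geomS_modeq {a b t : Int} (h : Int.ModEq t a b) (k : Nat) :
    Int.ModEq t (geomS a k) (geomS b k) := by
  induction k with
  | zero => rfl
  | succ k ih => exact Int.ModEq.add ih (Int.ModEq.pow k h)

theorem geomS_even (q : Int) (k : Nat) : geomS q (2 * k) = (q + 1) * geomS (q * q) k := by
  induction k with
  | zero => simp [geomS]
  | succ k ih =>
    have h2 : 2 * (k + 1) = (2 * k + 1) + 1 := by ring
    rw [h2]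
    simp only [geomS, ih]
    have hp : q ^ (2 * k) = (q * q) ^ k := by
      rw [two_mul, pow_add, ← pow_add]; ring
    have hp1 : q ^ (2 * k + 1) = q * (q * q) ^ k := by
      rw [pow_succ, hp]; ring
    rw [hp, hp1]; ring

theorem geomS_odd (q : Int) (k : Nat) :
    geomS q (2 * k + 1) = (q + 1) * geomS (q * q) k + (q * q) ^ k := by
  have hp : q ^ (2 * k) = (q * q) ^ k := by
    rw [two_mul, pow_add, ← pow_add]; ring
  simp only [geomS, geomS_even, hp]

theorem pow_two_mul (q : Int) (k : Nat) : q ^ (2 * k) = (q * q) ^ k := by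
  rw [two_mul, pow_add, ← pow_add]; ring

/-- Invariant of A's binary-doubling loop. -/
theorem loopA_eq (m : Nat) : ∀ (t q a v n : Int), n.toNat = m → 0 < n →
    vsotaLoopA t q a v n = Int.fmod (a * geomS q m + v * q ^ m) t := by
  induction m using Nat.strong_induction_on with
  | _ m ih =>
    intro t q a v n hm hn
    rw [vsotaLoopA]
    simp only [hn, dite_true]
    have hfd : PySem.Int.floordiv n 2 = n / 2 := by
      simp [PySem.Int.floordiv, Int.fdiv_eq_ediv_of_nonneg _ (by norm_num : (0:Int) ≤ 2)]
    have hmod2 : PySem.Int.mod n 2 = n % 2 := by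
      simp [PySem.Int.mod, Int.fmod_eq_emod_of_nonneg _ (by norm_num : (0:Int) ≤ 2)]
    set m' : Nat := (n / 2).toNat with hm'
    by_cases hz : n / 2 ≤ 0
    · -- n = 1: recursion terminates immediately
      have hn1 : n = 1 := by omega
      have hm1 : m = 1 := by omega
      subst hn1
      rw [vsotaLoopA]
      simp only [hfd, hmod2]
      norm_num
      rw [hm1]
      simp only [geomS]
      exact fmod_congr t (by unfold Int.ModEq; ring_nf)
    · have hm'lt : m' < m := by omega
      have hrec := ih m' hm'lt t (PySem.Int.mod (q * q) t) (PySem.Int.mod ((q + 1) * a) t)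
        (if PySem.Int.mod n 2 = 1 then PySem.Int.mod (q * v + a) t else v)
        (PySem.Int.floordiv n 2) (by rw [hfd]) (by omega)
      rw [hrec]
      -- congruence: replace the fmod-reduced state by the unreduced expressions
      have hq2 : Int.ModEq t (PySem.Int.mod (q * q) t) (q * q) := fmod_modeq _ t
      have ha2 : Int.ModEq t (PySem.Int.mod ((q + 1) * a) t) ((q + 1) * a) := fmod_modeq _ t
      by_cases hpar : n % 2 = 1
      · -- odd n : m = 2*m' + 1
        have hm2 : m = 2 * m' + 1 := by omega
        simp only [hmod2, hpar, if_true]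
        apply fmod_congr
        have hv : Int.ModEq t (PySem.Int.mod (q * v + a) t) (q * v + a) := fmod_modeq _ t
        calc (PySem.Int.mod ((q+1)*a) t) * geomS (PySem.Int.mod (q*q) t) m'
              + (PySem.Int.mod (q*v+a) t) * (PySem.Int.mod (q*q) t) ^ m'
            ≡ (q+1)*a * geomS (q*q) m' + (q*v+a) * (q*q) ^ m' [ZMOD t] := by
              exact Int.ModEq.add (Int.ModEq.mul ha2 (geomS_modeq hq2 m'))
                (Int.ModEq.mul hv (Int.ModEq.pow m' hq2))
          _ = a * geomS q m + v * q ^ m := by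
              rw [hm2, geomS_odd, pow_succ, pow_two_mul]; ring
      · -- even n : m = 2*m'
        have hm2 : m = 2 * m' := by omega
        simp only [hmod2, hpar, if_false]
        apply fmod_congr
        calc (PySem.Int.mod ((q+1)*a) t) * geomS (PySem.Int.mod (q*q) t) m'
              + v * (PySem.Int.mod (q*q) t) ^ m'
            ≡ (q+1)*a * geomS (q*q) m' + v * (q*q) ^ m' [ZMOD t] := by
              exact Int.ModEq.add (Int.ModEq.mul ha2 (geomS_modeq hq2 m'))
                (Int.ModEq.mul (Int.ModEq.refl v) (Int.ModEq.pow m' hq2))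
          _ = a * geomS q m + v * q ^ m := by
              rw [hm2, geomS_even, pow_two_mul]; ring

theorem geomS_add (q : Int) (k j : Nat) :
    geomS q (k + j) = geomS q k + q ^ k * geomS q j := by
  induction j with
  | zero => simp [geomS]
  | succ j ih =>
    show geomS q (k + j + 1) = _
    simp only [geomS, ih, pow_add]
    ring

/-- B's halving recursion also computes `(geomS q m).fmod t`. -/
theorem vsotaRec_eq (m : Nat) : ∀ (t q n : Int), n.toNat = m →
    vsotaRec t q n = Int.fmod (geomS q m) t := by
  induction m using Nat.strong_induction_on with
  | _ m ih =>
    intro t q n hm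
    rw [vsotaRec]
    have hmod2 : PySem.Int.mod n 2 = n % 2 := by
      simp [PySem.Int.mod, Int.fmod_eq_emod_of_nonneg _ (by norm_num : (0:Int) ≤ 2)]
    have hfd : PySem.Int.floordiv n 2 = n / 2 := by
      simp [PySem.Int.floordiv, Int.fdiv_eq_ediv_of_nonneg _ (by norm_num : (0:Int) ≤ 2)]
    by_cases h0 : n ≤ 0
    · have : m = 0 := by omega
      simp [h0, this, geomS]
    · simp only [h0, dite_false, hmod2, hfd]
      by_cases hpar : n % 2 = 1
      · -- odd: (1 + q * vsota(n-1)) % t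
        simp only [hpar, if_true]
        rw [ih (m - 1) (by omega) t q (n - 1) (by omega)]
        apply fmod_congr
        have hms : m = (m - 1) + 1 := by omega
        calc 1 + q * Int.fmod (geomS q (m - 1)) t
            ≡ 1 + q * geomS q (m - 1) [ZMOD t] :=
              Int.ModEq.add (Int.ModEq.refl 1)
                (Int.ModEq.mul (Int.ModEq.refl q) (fmod_modeq _ t))
          _ = geomS q m := by
              rw [hms, Nat.add_comm, geomS_add]; simp [geomS]
      · -- even: (h + pow(q, n//2, t) * h) % t
        simp only [hpar, if_false]
        set k : Nat := (n / 2).toNat with hk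
        rw [ih k (by omega) t q (n / 2) rfl]
        apply fmod_congr
        have hmk : m = k + k := by omega
        calc Int.fmod (geomS q k) t + PySem.Int.powMod q k t * Int.fmod (geomS q k) t
            ≡ geomS q k + q ^ k * geomS q k [ZMOD t] :=
              Int.ModEq.add (fmod_modeq _ t)
                (Int.ModEq.mul (fmod_modeq _ t) (fmod_modeq _ t))
          _ = geomS q m := by rw [hmk, geomS_add]

-- ===== VERDICT (by name: the statement is the Claim_ definition above) =====
theorem vsota_vrste_spec : Claim_equal_vsota_vrste := by
  intro q n t _ _
  unfold Spec_vsota_vrste vsota_vrste vsota_vrste_alt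
  rw [vsotaRec_eq n.toNat t (PySem.Int.mod q t) n rfl]
  by_cases hn : 0 < n
  · rw [loopA_eq n.toNat t _ 1 0 n rfl hn]
    apply fmod_congr
    unfold Int.ModEq
    ring_nf
  · rw [vsotaLoopA]
    simp only [hn, dite_false]
    have : n.toNat = 0 := by omega
    rw [this]
    simp [geomS]
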